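-- pv_equiv track=rewrite | github.com/sharadmangalick/garmin-weekly-email | recovery_dashboard.py | trend_arrow_higher_better
-- ===== SOURCE A (Python) =====
-- def trend_arrow_higher_better(values: list) -> str:
--     """Return trend arrow where higher is better (body battery, sleep score)."""
--     clean = [v for v in values if v is not None]
--     if len(clean) < 2:
--         return "—"
--     if clean[-1] > clean[-2]:
--         return "&#8599;"
--     elif clean[-1] < clean[-2]:
--         return "&#8600;"
--     return "&#8594;"
-- ===== SOURCE B (Python) =====
-- def trend_arrow_higher_better(values: list) -> str:
--     """Return trend arrow where higher is better (body battery, sleep score)."""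
--     found = []
--     for v in reversed(values):
--         if v is not None:
--             found.append(v)
--             if len(found) == 2:
--                 break
--     if len(found) < 2:
--         return "—"
--     last, prev = found
--     if last > prev:
--         return "&#8599;"
--     if last < prev:
--         return "&#8600;"
--     return "&#8594;"
-- ===== Notes on version B (the rewrite author's own statement) =====
-- stated objective: faster
-- what changed: B scans the list in reverse and stops as soon as the last two non-None values are found, instead of building the full filtered list and indexing it from the end (early exit avoids materialising the filtered list).
import Mathlib
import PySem

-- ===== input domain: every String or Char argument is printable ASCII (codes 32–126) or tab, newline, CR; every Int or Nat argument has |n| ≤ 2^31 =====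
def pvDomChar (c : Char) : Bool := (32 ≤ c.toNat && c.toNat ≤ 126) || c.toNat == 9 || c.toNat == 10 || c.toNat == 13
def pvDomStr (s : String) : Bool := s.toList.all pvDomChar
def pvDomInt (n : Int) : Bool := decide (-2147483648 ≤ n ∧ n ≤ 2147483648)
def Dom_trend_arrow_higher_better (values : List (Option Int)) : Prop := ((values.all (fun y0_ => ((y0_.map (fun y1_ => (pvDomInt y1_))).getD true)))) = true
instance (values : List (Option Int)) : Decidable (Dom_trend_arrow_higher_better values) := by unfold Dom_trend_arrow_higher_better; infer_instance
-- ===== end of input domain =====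

-- B scans the list in reverse and stops after finding the last two non-None values,
-- instead of building the full filtered list and indexing it from the end (alternative decomposition).


-- ===== PORT A =====
def trend_arrow_higher_better (values : List (Option Int)) : String :=
  let clean := values.filterMap id
  if clean.length < 2 then "—"
  else
    match PySem.List.pyGet? clean (-1), PySem.List.pyGet? clean (-2) with
    | some a, some b =>
        if a > b then "&#8599;"
        else if a < b then "&#8600;"
        else "&#8594;"
    | _, _ => "—"   -- unreachable: both indices are in range when clean.length ≥ 2

-- ===== PORT B =====
-- the reversed-scan loop of Source B: accumulate non-None values into `found`, break at 2
def pvCollectTwo : List (Option Int) → List Int → List Int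
  | [], found => found
  | v :: rest, found =>
    match v with
    | none => pvCollectTwo rest found
    | some x =>
        let found' := found ++ [x]
        if found'.length == 2 then found' else pvCollectTwo rest found'

def trend_arrow_higher_better_alt (values : List (Option Int)) : String :=
  let found := pvCollectTwo values.reverse []
  match found with
  | last :: prev :: _ =>
      if last > prev then "&#8599;"
      else if last < prev then "&#8600;"
      else "&#8594;"
  | _ => "—"

-- ===== PRECONDITION & SPEC =====
def Spec_trend_arrow_higher_better (values : List (Option Int)) (out : String) : Prop := out = trend_arrow_higher_better_alt values
instance (values : List (Option Int)) (out : String) : Decidable (Spec_trend_arrow_higher_better values out) := by unfold Spec_trend_arrow_higher_better; infer_instance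

-- ===== CLAIM (what is proved, stated in full; the proofs are below) =====
def Claim_equal_trend_arrow_higher_better : Prop := ∀ (values : List (Option Int)), Dom_trend_arrow_higher_better values → Spec_trend_arrow_higher_better values (trend_arrow_higher_better values)

-- ===== LEMMAS AND PROOFS =====
theorem pvCollectTwo_one (l : List (Option Int)) (x : Int) :
    pvCollectTwo l [x] = x :: (l.filterMap id).take 1 := by
  induction l with
  | nil => simp [pvCollectTwo]
  | cons v rest ih =>
    cases v with
    | none => simpa [pvCollectTwo] using ih
    | some y => simp [pvCollectTwo]

theorem pvCollectTwo_nil (l : List (Option Int)) :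
    pvCollectTwo l [] = (l.filterMap id).take 2 := by
  induction l with
  | nil => simp [pvCollectTwo]
  | cons v rest ih =>
    cases v with
    | none => simpa [pvCollectTwo] using ih
    | some y => simp [pvCollectTwo, pvCollectTwo_one]

theorem trend_arrow_equal (values : List (Option Int)) :
    trend_arrow_higher_better values = trend_arrow_higher_better_alt values := by
  unfold trend_arrow_higher_better trend_arrow_higher_better_alt
  have hrev : values.reverse.filterMap id = (values.filterMap id).reverse := by
    simp
  rw [pvCollectTwo_nil, hrev]
  set clean := values.filterMap id with hclean
  rcases h : clean.reverse with _ | ⟨a, tl⟩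
  · have : clean = [] := by simpa using congrArg List.reverse h
    simp [this]
  · rcases tl with _ | ⟨b, t⟩
    · have : clean = [a] := by simpa using congrArg List.reverse h
      simp [this]
    · have hc : clean = t.reverse ++ [b, a] := by
        have := congrArg List.reverse h
        simpa using this
      have hlen : ¬ clean.length < 2 := by simp [hc]
      have h1 : PySem.List.pyGet? clean (-1) = some a := by
        rw [PySem.List.pyGet?_neg_one, hc]
        simp [List.getLast?_append]
      have h2 : PySem.List.pyGet? clean (-2) = some b := by
        have hl2 : (2:ℕ) ≤ clean.length := by simp [hc]
        rw [PySem.List.pyGet?_neg_ofNat clean 2 (by omega) hl2, hc]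
        have : (t.reverse ++ [b, a]).length - 2 = t.reverse.length := by simp
        rw [this, List.getElem?_append_right (by omega)]
        simp
      simp only [hlen, h1, h2, if_false, List.take]

-- ===== VERDICT (by name: the statement is the Claim_ definition above) =====
theorem trend_arrow_higher_better_spec : Claim_equal_trend_arrow_higher_better := by
  intro values _
  unfold Spec_trend_arrow_higher_better
  exact trend_arrow_equal values
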